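-- pv_equiv track=rewrite | github.com/Schascha1/iSHAP | utils.py | valid_sub_partition
-- ===== SOURCE A (Python) =====
-- def valid_sub_partition(P, max_partition):
--     valid_subset = True
--     for s in P:
--         subset_found = False
--         for sM in max_partition:
--             if s.issubset(sM):
--                 subset_found = True
--                 break
--         if not subset_found:
--             valid_subset = False
--             break
--     return valid_subset
-- ===== SOURCE B (Python) =====
-- def valid_sub_partition(P, max_partition):
--     # Index pass: owner[x] = list of ids of max sets containing x; each s is
--     # covered iff the intersection of its elements' id lists is non-empty.
--     owner = {}
--     for i, sM in enumerate(max_partition):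
--         for x in sM:
--             owner.setdefault(x, []).append(i)
--     for s in P:
--         if not s:
--             if not max_partition:
--                 return False
--             continue
--         it = iter(s)
--         ids = owner.get(next(it), [])
--         for x in it:
--             own = owner.get(x, [])
--             ids = [j for j in ids if j in own]
--         if not ids:
--             return False
--     return True
-- ===== Notes on version B (the rewrite author's own statement) =====
-- stated objective: alternative
-- what changed: Instead of testing each set in P against every max set by a nested subset scan, B builds once an index mapping each element to the ids of the max sets containing it, and a set s is covered iff the intersection of its elements' id lists is non-empty.
import Mathlib
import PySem

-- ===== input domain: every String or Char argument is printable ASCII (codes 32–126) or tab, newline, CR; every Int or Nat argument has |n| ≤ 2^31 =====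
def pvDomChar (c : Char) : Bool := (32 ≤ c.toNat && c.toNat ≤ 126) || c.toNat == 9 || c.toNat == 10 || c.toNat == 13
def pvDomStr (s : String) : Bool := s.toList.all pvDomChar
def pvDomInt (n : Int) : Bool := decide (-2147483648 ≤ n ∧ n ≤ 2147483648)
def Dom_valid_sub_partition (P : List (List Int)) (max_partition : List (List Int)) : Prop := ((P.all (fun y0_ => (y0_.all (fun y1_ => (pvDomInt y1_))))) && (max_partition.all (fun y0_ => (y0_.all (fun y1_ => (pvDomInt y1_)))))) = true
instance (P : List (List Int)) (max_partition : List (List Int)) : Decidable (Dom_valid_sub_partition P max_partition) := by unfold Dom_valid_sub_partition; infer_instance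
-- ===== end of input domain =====

-- B replaces the nested subset scan by an element->max-set-id index built once, covering each set iff its elements share a max-set id (alternative algorithm, similar cost).
-- ===== PORT A =====

def vspFind (s : List Int) : List (List Int) → Bool
  | [] => false
  | sM :: rest => if PySem.Set.issubset s sM then true else vspFind s rest

def vspOuter (max_partition : List (List Int)) : List (List Int) → Bool
  | [] => true
  | s :: rest => if vspFind s max_partition then vspOuter max_partition rest else false

def valid_sub_partition (P : List (List Int)) (max_partition : List (List Int)) : Bool :=
  vspOuter max_partition P

-- ===== PORT B =====
def vspOwner (M : List (List Int)) : PySem.Dict Int (List Int) :=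
  (PySem.List.enumerate M).foldl
    (fun d p => p.2.foldl (fun d' x => d'.modify x [] (· ++ [p.1])) d) PySem.Dict.empty

def vspCovered (owner : PySem.Dict Int (List Int)) (M : List (List Int)) (s : List Int) : Bool :=
  match s with
  | [] => !M.isEmpty
  | x :: xs => !(xs.foldl (fun ids y => ids.filter (fun j => (owner.getD y []).contains j))
      (owner.getD x [])).isEmpty

def valid_sub_partition_alt (P : List (List Int)) (max_partition : List (List Int)) : Bool :=
  let owner := vspOwner max_partition
  P.all (vspCovered owner max_partition)


-- ===== PRECONDITION & SPEC =====
def Spec_valid_sub_partition (P : List (List Int)) (max_partition : List (List Int)) (out : Bool) : Prop := out = valid_sub_partition_alt P max_partition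
instance (P : List (List Int)) (max_partition : List (List Int)) (out : Bool) : Decidable (Spec_valid_sub_partition P max_partition out) := by unfold Spec_valid_sub_partition; infer_instance

-- ===== CLAIM (what is proved, stated in full; the proofs are below) =====
def Claim_equal_valid_sub_partition : Prop := ∀ (P : List (List Int)) (max_partition : List (List Int)), Dom_valid_sub_partition P max_partition → Spec_valid_sub_partition P max_partition (valid_sub_partition P max_partition)

-- ===== LEMMAS AND PROOFS =====
lemma vspFind_iff (s : List Int) (M : List (List Int)) :
    vspFind s M = true ↔ ∃ sM ∈ M, ∀ y ∈ s, y ∈ sM := by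
  induction M with
  | nil => simp [vspFind]
  | cons sM rest ih =>
    simp only [vspFind]
    split_ifs with h
    · simp only [true_iff]
      exact ⟨sM, List.mem_cons_self, by simpa [PySem.Set.issubset, List.all_eq_true] using h⟩
    · simp only [ih, List.mem_cons]
      constructor
      · rintro ⟨t, ht, hs⟩; exact ⟨t, Or.inr ht, hs⟩
      · rintro ⟨t, ht | ht, hs⟩
        · exact absurd (by simpa [PySem.Set.issubset, List.all_eq_true] using (ht ▸ hs)) (by simpa using h)
        · exact ⟨t, ht, hs⟩

lemma foldl_nested_eq_flat (L : List (Int × List Int)) (d : PySem.Dict Int (List Int)) :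
    L.foldl (fun d p => p.2.foldl (fun d' x => d'.modify x [] (· ++ [p.1])) d) d
      = (L.flatMap (fun p => p.2.map (fun x => (x, p.1)))).foldl
          (fun d q => d.modify q.1 [] (· ++ [q.2])) d := by
  induction L generalizing d with
  | nil => rfl
  | cons p rest ih =>
    simp only [List.flatMap_cons, List.foldl_cons, List.foldl_append, List.foldl_map]
    exact ih _

lemma mem_vspOwner (M : List (List Int)) (x i : Int) :
    i ∈ (vspOwner M).getD x [] ↔ ∃ k : Nat, ∃ h : k < M.length, i = (k : Int) ∧ x ∈ M[k] := by
  rw [vspOwner, foldl_nested_eq_flat, PySem.Dict.getD_foldl_modify_append]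
  simp only [PySem.Dict.getD_empty, List.nil_append, List.mem_map, List.mem_filter,
    List.mem_flatMap, PySem.List.mem_enumerate_iff]
  constructor
  · rintro ⟨q, ⟨⟨p, ⟨⟨k, hk, rfl⟩, hq⟩⟩, hx⟩, rfl⟩
    obtain ⟨y, hy, rfl⟩ := hq
    simp only [beq_iff_eq] at hx
    exact ⟨k, hk, by simpa using hx ▸ hy⟩
  · rintro ⟨k, hk, rfl, hx⟩
    exact ⟨(x, (k : Int)), ⟨⟨((k : Int), M[k]), ⟨k, hk, by simp⟩, ⟨x, hx, by simp⟩⟩, by simp⟩, rfl⟩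

lemma mem_idsFold (owner : PySem.Dict Int (List Int)) (xs : List Int) (ids0 : List Int) (j : Int) :
    j ∈ xs.foldl (fun ids y => ids.filter (fun j => (owner.getD y []).contains j)) ids0 ↔
      j ∈ ids0 ∧ ∀ y ∈ xs, j ∈ owner.getD y [] := by
  induction xs generalizing ids0 with
  | nil => simp
  | cons y ys ih =>
    simp only [List.foldl_cons, ih, List.mem_filter, List.mem_cons]
    constructor
    · rintro ⟨⟨h0, hy⟩, hall⟩
      exact ⟨h0, fun z hz => hz.elim (fun e => e ▸ (by simpa using hy)) (hall z)⟩
    · rintro ⟨h0, hall⟩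
      exact ⟨⟨h0, by simpa using hall y (Or.inl rfl)⟩, fun z hz => hall z (Or.inr hz)⟩

lemma vspCovered_eq_find (M : List (List Int)) (s : List Int) :
    vspCovered (vspOwner M) M s = vspFind s M := by
  cases s with
  | nil =>
    cases M with
    | nil => simp [vspCovered, vspFind]
    | cons sM rest => simp [vspCovered, vspFind, PySem.Set.issubset]
  | cons x xs =>
    simp only [vspCovered]
    rw [Bool.eq_iff_iff, Bool.not_eq_true', List.isEmpty_eq_false_iff_exists_mem, vspFind_iff]
    simp only [mem_idsFold, mem_vspOwner]
    constructor
    · rintro ⟨j, ⟨k, hk, rfl, hx⟩, hall⟩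
      refine ⟨M[k], List.getElem_mem hk, fun y hy => ?_⟩
      rcases List.mem_cons.mp hy with rfl | hy
      · exact hx
      · obtain ⟨k', hk', hkk', hy'⟩ := hall y hy
        have : k = k' := by exact_mod_cast hkk'
        exact this ▸ hy'
    · rintro ⟨sM, hsM, hsub⟩
      obtain ⟨k, hk, rfl⟩ := List.mem_iff_getElem.mp hsM
      exact ⟨(k : Int), ⟨k, hk, rfl, hsub x List.mem_cons_self⟩,
        fun y hy => ⟨k, hk, rfl, hsub y (List.mem_cons_of_mem x hy)⟩⟩

lemma vspOuter_eq_all (M : List (List Int)) (P : List (List Int)) :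
    vspOuter M P = P.all (fun s => vspFind s M) := by
  induction P with
  | nil => rfl
  | cons s rest ih => simp only [vspOuter, List.all_cons, ih]; split_ifs with h <;> simp [h]

theorem valid_sub_partition_spec : Claim_equal_valid_sub_partition := by
  intro P M _
  unfold Spec_valid_sub_partition
  rw [valid_sub_partition, valid_sub_partition_alt, vspOuter_eq_all]
  exact congrArg P.all (funext fun s => (vspCovered_eq_find M s).symm)

-- ===== VERDICT (by name: the statement is the Claim_ definition above) =====
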